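-- pv_equiv track=rewrite | github.com/graingert/priority | test/test_priority.py | active_readme_streams_from_filter
-- ===== SOURCE A (Python) =====
-- def active_readme_streams_from_filter(filtered, blocked=True):
--     """
--     Given a collection of filtered streams, determine which ones are active.
--     This applies only to the readme tree at this time, though in future it
--     should be possible to apply this to an arbitrary tree.
--
--     If ``blocked`` is ``True``, the filter is a set of blocked streams. If
--     ``False``, it's a collection of unblocked streams.
--     """
--     tree = {
--         1: {
--             5: {},
--         },
--         3: {},
--         7: {
--             11: {
--                 9: {},
--             },
--         },
--     }
--     filtered = set(filtered)
--
--     def get_expected(tree):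
--         expected = []
--
--         for stream_id in tree:
--             if stream_id not in filtered and blocked:
--                 expected.append(stream_id)
--             elif stream_id in filtered and not blocked:
--                 expected.append(stream_id)
--             else:
--                 expected.extend(get_expected(tree[stream_id]))
--
--         return expected
--
--     return get_expected(tree)
-- ===== SOURCE B (Python) =====
-- def active_readme_streams_from_filter(filtered, blocked=True):
--     tree = {
--         1: {
--             5: {},
--         },
--         3: {},
--         7: {
--             11: {
--                 9: {},
--             },
--         },
--     }
--     filtered = set(filtered)
--     result = []
--     stack = list(tree.items())[::-1]
--     while stack:
--         stream_id, children = stack.pop()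
--         if (stream_id not in filtered and blocked) or (stream_id in filtered and not blocked):
--             result.append(stream_id)
--         else:
--             stack.extend(list(children.items())[::-1])
--     return result
-- ===== Notes on version B (the rewrite author's own statement) =====
-- stated objective: alternative
-- what changed: Replaced the inner recursive get_expected helper with an iterative preorder DFS over an explicit stack (children pushed in reverse order) and merged the two accepting branches into one condition.
import Mathlib
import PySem

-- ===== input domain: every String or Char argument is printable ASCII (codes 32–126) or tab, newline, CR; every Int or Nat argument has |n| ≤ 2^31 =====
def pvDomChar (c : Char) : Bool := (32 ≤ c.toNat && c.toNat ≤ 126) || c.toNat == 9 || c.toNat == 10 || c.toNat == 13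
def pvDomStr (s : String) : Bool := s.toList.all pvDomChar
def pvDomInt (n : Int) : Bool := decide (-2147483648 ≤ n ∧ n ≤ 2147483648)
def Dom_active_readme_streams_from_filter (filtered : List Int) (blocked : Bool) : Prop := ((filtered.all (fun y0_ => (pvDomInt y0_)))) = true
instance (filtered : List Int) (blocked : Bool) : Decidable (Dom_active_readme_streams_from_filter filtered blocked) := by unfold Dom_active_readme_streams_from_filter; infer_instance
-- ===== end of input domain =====

-- B replaces the recursive get_expected helper with an iterative explicit-stack preorder DFS (alternative decomposition, same cost).

-- The fixed readme tree: a dict-of-dicts, encoded as a first-child/next-sibling structure.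
-- `cons id sub rest` is the dict whose first item is (id, sub) and whose remaining items are rest.
inductive PvTree : Type
  | leaf : PvTree
  | cons : Int → PvTree → PvTree → PvTree
deriving DecidableEq, Repr

-- {1: {5: {}}, 3: {}, 7: {11: {9: {}}}}
def pvReadmeTree : PvTree :=
  .cons 1 (.cons 5 .leaf .leaf)
    (.cons 3 .leaf
      (.cons 7 (.cons 11 (.cons 9 .leaf .leaf) .leaf) .leaf))

-- ===== PORT A =====
-- A's recursive get_expected: walk the items in order; the if/elif branches append
-- the id, the else branch extends with the recursive result on the children.
def pvGetExpected (s : PySem.Set Int) (blocked : Bool) : PvTree → List Int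
  | .leaf => []
  | .cons id sub rest =>
      (if !(PySem.Set.contains s id) && blocked then [id]
       else if PySem.Set.contains s id && !blocked then [id]
       else pvGetExpected s blocked sub) ++ pvGetExpected s blocked rest

def active_readme_streams_from_filter (filtered : List Int) (blocked : Bool) : List Int :=
  pvGetExpected (PySem.Set.ofList filtered) blocked pvReadmeTree

-- ===== PORT B =====
-- items(tree): the (id, children) pairs of a dict, in order.
def pvItems : PvTree → List (Int × PvTree)
  | .leaf => []
  | .cons id sub rest => (id, sub) :: pvItems rest

def pvTreeSize : PvTree → Nat
  | .leaf => 0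
  | .cons _ sub rest => 1 + pvTreeSize sub + pvTreeSize rest

def pvStackSize (stk : List (Int × PvTree)) : Nat :=
  (stk.map (fun e => 1 + pvTreeSize e.2)).sum

theorem pvStackSize_items_lt (id : Int) (sub : PvTree) (rest : List (Int × PvTree)) :
    pvStackSize (pvItems sub ++ rest) < pvStackSize ((id, sub) :: rest) := by
  have h : ∀ t rest', pvStackSize (pvItems t ++ rest') = pvTreeSize t + pvStackSize rest' := by
    intro t
    induction t with
    | leaf => intro rest'; simp [pvItems, pvTreeSize, pvStackSize]
    | cons i s r ihs ihr =>
        intro rest'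
        simp only [pvItems, pvTreeSize, List.cons_append, pvStackSize, List.map_cons, List.sum_cons]
        have := ihr rest'
        simp only [pvStackSize] at this
        omega
  have := h sub rest
  simp only [pvStackSize, List.map_cons, List.sum_cons] at *
  omega

-- the while loop: stack held TOP-FIRST (Python's list reversed: pop() = head,
-- extend(list(children.items())[::-1]) = pvItems children ++ stack).
def pvDfs (s : PySem.Set Int) (blocked : Bool) :
    List (Int × PvTree) → List Int → List Int
  | [], result => result
  | (id, children) :: stk, result =>
      if (!(PySem.Set.contains s id) && blocked) || (PySem.Set.contains s id && !blocked) then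
        pvDfs s blocked stk (result ++ [id])
      else
        pvDfs s blocked (pvItems children ++ stk) result
termination_by stk _ => pvStackSize stk
decreasing_by
  · simp only [pvStackSize, List.map_cons, List.sum_cons]; omega
  · exact pvStackSize_items_lt id children stk

def active_readme_streams_from_filter_alt (filtered : List Int) (blocked : Bool) : List Int :=
  pvDfs (PySem.Set.ofList filtered) blocked (pvItems pvReadmeTree) []

-- ===== PRECONDITION & SPEC =====
def Spec_active_readme_streams_from_filter (filtered : List Int) (blocked : Bool) (out : List Int) : Prop := out = active_readme_streams_from_filter_alt filtered blocked
instance (filtered : List Int) (blocked : Bool) (out : List Int) : Decidable (Spec_active_readme_streams_from_filter filtered blocked out) := by unfold Spec_active_readme_streams_from_filter; infer_instance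

-- ===== CLAIM (what is proved, stated in full; the proofs are below) =====
def Claim_equal_active_readme_streams_from_filter : Prop := ∀ (filtered : List Int) (blocked : Bool), Dom_active_readme_streams_from_filter filtered blocked → Spec_active_readme_streams_from_filter filtered blocked (active_readme_streams_from_filter filtered blocked)

-- ===== LEMMAS AND PROOFS =====

-- per-node contribution of A's recursion
def pvNodeExp (s : PySem.Set Int) (blocked : Bool) (id : Int) (sub : PvTree) : List Int :=
  if (!(PySem.Set.contains s id) && blocked) || (PySem.Set.contains s id && !blocked) then [id]
  else pvGetExpected s blocked sub

theorem pvGetExpected_eq_flatMap (s : PySem.Set Int) (blocked : Bool) (t : PvTree) :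
    pvGetExpected s blocked t = (pvItems t).flatMap (fun e => pvNodeExp s blocked e.1 e.2) := by
  induction t with
  | leaf => simp [pvGetExpected, pvItems]
  | cons id sub rest ihs ihr =>
      simp only [pvGetExpected, pvItems, List.flatMap_cons, ihr, pvNodeExp]
      cases h : PySem.Set.contains s id <;> cases blocked <;> simp

theorem pvDfs_eq (s : PySem.Set Int) (blocked : Bool) :
    ∀ (stk : List (Int × PvTree)) (result : List Int),
      pvDfs s blocked stk result =
        result ++ stk.flatMap (fun e => pvNodeExp s blocked e.1 e.2) := by
  intro stk result
  induction stk, result using pvDfs.induct s blocked with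
  | case1 result => simp [pvDfs]
  | case2 id children stk result hcond ih =>
      rw [pvDfs]
      simp only [hcond, if_true, ih, List.flatMap_cons, pvNodeExp, hcond, if_true]
      simp
  | case3 id children stk result hcond ih =>
      rw [pvDfs, if_neg hcond, ih, List.flatMap_append, List.flatMap_cons]
      rw [show pvNodeExp s blocked id children = pvGetExpected s blocked children from
        by rw [pvNodeExp, if_neg hcond]]
      rw [pvGetExpected_eq_flatMap]

-- ===== VERDICT (by name: the statement is the Claim_ definition above) =====
theorem active_readme_streams_from_filter_spec : Claim_equal_active_readme_streams_from_filter := by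
  intro filtered blocked _
  unfold Spec_active_readme_streams_from_filter
  unfold active_readme_streams_from_filter active_readme_streams_from_filter_alt
  rw [pvDfs_eq, pvGetExpected_eq_flatMap]
  simp
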